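-- pv_equiv track=rewrite | github.com/fnareoh/DTW | framed_DTW/src/read/read_generator.py | deletion_before
-- ===== SOURCE A (Python) =====
-- def deletion_before(qual):
--     """ Compute for each position i the number of deletion in qual[:i] """
--     dele_prec = [0] * len(qual)
--     nb_del = 0
--     for i, c in enumerate(qual):
--         dele_prec[i] = nb_del
--         if c == "D":
--             nb_del += 1
--     return dele_prec
-- ===== SOURCE B (Python) =====
-- def deletion_before(qual):
--     """ Compute for each position i the number of deletion in qual[:i] """
--     return [qual[:i].count("D") for i in range(len(qual))]
-- ===== Notes on version B (the rewrite author's own statement) =====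
-- stated objective: simpler
-- what changed: Replaces the running-counter accumulation loop over a preallocated array by a one-line comprehension that independently counts the deletion marker in each prefix slice (quadratic instead of linear, but plainer).
import Mathlib
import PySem

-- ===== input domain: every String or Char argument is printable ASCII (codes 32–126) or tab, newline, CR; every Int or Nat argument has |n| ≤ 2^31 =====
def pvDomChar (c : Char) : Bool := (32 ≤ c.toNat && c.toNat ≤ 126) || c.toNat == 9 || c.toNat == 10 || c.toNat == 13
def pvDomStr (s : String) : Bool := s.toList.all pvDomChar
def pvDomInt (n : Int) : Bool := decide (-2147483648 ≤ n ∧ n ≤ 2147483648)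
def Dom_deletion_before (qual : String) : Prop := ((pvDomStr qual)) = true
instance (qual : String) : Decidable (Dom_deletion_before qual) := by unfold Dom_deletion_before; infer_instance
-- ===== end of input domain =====

-- B replaces A's running-counter loop by a comprehension counting deletions in each prefix slice (simpler, though quadratic).
-- ===== PORT A =====
-- A, transliterated: preallocated [0]*len list, enumerate loop assigning dele_prec[i] = nb_del
def deletion_before (qual : String) : List Int :=
  ((PySem.List.enumerate qual.toList 0).foldl
    (fun (st : List Int × Int) ic =>
      (st.1.set ic.1.toNat st.2, st.2 + (if ic.2 = 'D' then 1 else 0)))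
    (List.replicate qual.toList.length (0 : Int), 0)).1

-- ===== PORT B =====
-- B: [qual[:i].count("D") for i in range(len(qual))]
def deletion_before_alt (qual : String) : List Int :=
  (PySem.List.pyRange 0 (qual.toList.length : Int) 1).map
    (fun i => ((PySem.List.slice qual.toList none (some i)).count 'D' : Int))

-- ===== PRECONDITION & SPEC =====
def Spec_deletion_before (qual : String) (out : List Int) : Prop := out = deletion_before_alt qual
instance (qual : String) (out : List Int) : Decidable (Spec_deletion_before qual out) := by unfold Spec_deletion_before; infer_instance

-- ===== CLAIM (what is proved, stated in full; the proofs are below) =====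
def Claim_equal_deletion_before : Prop := ∀ (qual : String), Dom_deletion_before qual → Spec_deletion_before qual (deletion_before qual)

-- ===== LEMMAS AND PROOFS =====

-- ===== VERDICT (by name: the statement is the Claim_ definition above) =====
-- Loop invariant for A's fold: with s cells already filled, the result is the
-- filled prefix followed by the prefix-counts of the remaining characters offset by n.
lemma delA_fold (l : List Char) : ∀ (s : Nat) (arr : List Int) (n : Int),
    arr.length = s + l.length →
    ((PySem.List.enumerate l (s : Int)).foldl
      (fun (st : List Int × Int) ic =>
        (st.1.set ic.1.toNat st.2, st.2 + (if ic.2 = 'D' then 1 else 0))) (arr, n)).1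
    = arr.take s ++ (List.range l.length).map (fun i => n + ((l.take i).count 'D' : Int)) := by
  induction l with
  | nil =>
    intro s arr n h
    simp only [PySem.List.enumerate_nil, List.foldl_nil, List.length_nil, List.range_zero,
      List.map_nil, List.append_nil]
    exact (List.take_of_length_le (by simp at h; omega)).symm
  | cons c t ih =>
    intro s arr n h
    rw [PySem.List.enumerate_cons]
    simp only [List.foldl_cons]
    have hs : ((s : Int)).toNat = s := by simp
    have hlen : (arr.set s n).length = (s+1) + t.length := by
      simp only [List.length_set]; simp at h; omega
    have := ih (s+1) (arr.set s n) (n + (if c = 'D' then 1 else 0)) hlen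
    push_cast at this
    rw [hs, this]
    have hslt : s < arr.length := by simp at h; omega
    have htake : (arr.set s n).take (s+1) = arr.take s ++ [n] := by
      rw [List.take_add_one]
      simp only [List.take_set, List.getElem?_set_self hslt, Option.toList_some]
      congr 1
      exact List.set_eq_of_length_le (by simp)
    rw [htake]
    show _ = List.take s arr ++ List.map _ (List.range (t.length + 1))
    rw [List.range_succ_eq_map, List.map_cons, List.map_map]
    simp only [List.take_zero, List.count_nil, Nat.cast_zero, add_zero, List.append_assoc,
      List.singleton_append]
    congr 2
    refine List.map_congr_left fun i _ => ?_
    simp only [Function.comp, List.take_succ_cons, List.count_cons]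
    push_cast
    by_cases hc : c = 'D' <;> simp [hc] <;> try ring

lemma delB_eq (qual : String) :
    deletion_before_alt qual
    = (List.range qual.toList.length).map
        (fun i => ((qual.toList.take i).count 'D' : Int)) := by
  unfold deletion_before_alt
  rw [PySem.List.pyRange_one]
  simp only [zero_add, List.map_map]
  congr 1
  funext k
  simp [PySem.List.slice_to_natCast]

theorem deletion_before_spec : Claim_equal_deletion_before := by
  intro qual _
  unfold Spec_deletion_before deletion_before
  have h0 : PySem.List.enumerate qual.toList = PySem.List.enumerate qual.toList ((0 : Nat) : Int) := by norm_num
  rw [h0, delA_fold qual.toList 0 _ 0 (by simp), delB_eq]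
  simp
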